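-- pv_equiv track=rewrite | github.com/emad-aldeen/Pythonic-Data-Structures-and-Algorithms | data_structures_and_algorithms/challenges/array_shift/array_shift.py | insertShiftArray2
-- ===== SOURCE A (Python) =====
-- def insertShiftArray2(lst,n):
--
--     resList = [[0] for i in range(len(lst)+1)]
--
--     if len(lst) % 2 == 0:
--         j = len(lst)//2
--     else:
--         if lst[(len(lst)//2)] < n:
--             j = (len(lst)//2)+1
--         else:
--             j = (len(lst)//2)
--
--     for i in range(len(resList)):
--         if i == j:
--             resList[i] = n
--         elif i < j:
--             resList[i] = lst[i]
--         else:
--             resList[i] = lst[i-1]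
--
--     return resList
-- ===== SOURCE B (Python) =====
-- def insertShiftArray2(lst, n):
--     m = len(lst)
--     if m % 2 == 0:
--         j = m // 2
--     else:
--         j = m // 2 + 1 if lst[m // 2] < n else m // 2
--     return lst[:j] + [n] + lst[j:]
-- ===== Notes on version B (the rewrite author's own statement) =====
-- stated objective: simpler
-- what changed: Keeps A's insertion-index computation but replaces the element-wise loop with three-way branching over a preallocated result by a single slice-and-concatenate construction lst[:j] + [n] + lst[j:].
import Mathlib
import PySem

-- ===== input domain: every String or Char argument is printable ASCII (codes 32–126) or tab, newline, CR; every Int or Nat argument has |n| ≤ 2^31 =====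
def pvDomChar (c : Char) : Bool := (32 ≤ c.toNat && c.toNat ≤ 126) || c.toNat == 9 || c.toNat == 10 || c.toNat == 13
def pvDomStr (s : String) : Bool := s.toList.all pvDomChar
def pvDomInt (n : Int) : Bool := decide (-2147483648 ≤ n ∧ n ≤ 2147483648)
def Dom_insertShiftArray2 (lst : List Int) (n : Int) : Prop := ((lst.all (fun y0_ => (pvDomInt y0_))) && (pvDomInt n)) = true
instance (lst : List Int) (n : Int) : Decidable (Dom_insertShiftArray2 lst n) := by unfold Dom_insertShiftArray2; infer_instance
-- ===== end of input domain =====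

-- B replaces A's element-wise loop (branching on each output index) by a single
-- slice-and-concatenate construction lst[:j] + [n] + lst[j:]; same insertion index j.

-- ===== PORT A =====
-- lst[mid] in A's odd branch: mid = len//2 is provably in range (len is odd, so len ≥ 1),
-- so pyGetD is exact for Python's lst[mid] here.
def insertShiftArray2 (lst : List Int) (n : Int) : List Int :=
  let len : Int := lst.length
  let j : Int :=
    if PySem.Int.mod len 2 = 0 then PySem.Int.floordiv len 2
    else if PySem.List.pyGetD lst (PySem.Int.floordiv len 2) 0 < n then
      PySem.Int.floordiv len 2 + 1
    else PySem.Int.floordiv len 2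
  -- 'for i in range(len(resList)): resList[i] = …' — builds the result position by position
  (PySem.List.pyRange 0 (len + 1) 1).foldl
    (fun acc i =>
      acc ++ [if i = j then n
              else if i < j then PySem.List.pyGetD lst i 0
              else PySem.List.pyGetD lst (i - 1) 0]) []

-- ===== PORT B =====
def insertShiftArray2_alt (lst : List Int) (n : Int) : List Int :=
  let m : Int := lst.length
  let j : Int :=
    if PySem.Int.mod m 2 = 0 then PySem.Int.floordiv m 2
    else if PySem.List.pyGetD lst (PySem.Int.floordiv m 2) 0 < n then
      PySem.Int.floordiv m 2 + 1
    else PySem.Int.floordiv m 2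
  PySem.List.slice lst none (some j) ++ [n] ++ PySem.List.slice lst (some j) none

-- ===== PRECONDITION & SPEC =====
def Spec_insertShiftArray2 (lst : List Int) (n : Int) (out : List Int) : Prop := out = insertShiftArray2_alt lst n
instance (lst : List Int) (n : Int) (out : List Int) : Decidable (Spec_insertShiftArray2 lst n out) := by unfold Spec_insertShiftArray2; infer_instance

-- ===== CLAIM (what is proved, stated in full; the proofs are below) =====
def Claim_equal_insertShiftArray2 : Prop := ∀ (lst : List Int) (n : Int), Dom_insertShiftArray2 lst n → Spec_insertShiftArray2 lst n (insertShiftArray2 lst n)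

-- ===== LEMMAS AND PROOFS =====

-- A's loop over range(len+1) with the three-way branch builds take j ++ [n] ++ drop j.
theorem pv_fold_eq (lst : List Int) (n j : Int) (h0 : 0 ≤ j) (h1 : j ≤ (lst.length : Int)) :
    (PySem.List.pyRange 0 ((lst.length : Int) + 1) 1).foldl
      (fun acc i =>
        acc ++ [if i = j then n
                else if i < j then PySem.List.pyGetD lst i 0
                else PySem.List.pyGetD lst (i - 1) 0]) []
    = lst.take j.toNat ++ n :: lst.drop j.toNat := by
  rw [PySem.List.foldl_append_singleton_eq_map]
  apply List.ext_getElem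
  · simp [PySem.List.length_pyRange_one]
  · intro k hk1 hk2
    simp only [List.nil_append] at hk1 ⊢
    have hkb : k < lst.length + 1 := by
      simpa [PySem.List.length_pyRange_one] using hk1
    have hget : (PySem.List.pyRange 0 ((lst.length : Int) + 1) 1)[k]'(by
        simpa [PySem.List.length_pyRange_one] using hkb) = (k : Int) := by
      rw [PySem.List.getElem_pyRange_one]; ring
    rw [List.getElem_map, hget]
    set t := j.toNat with ht
    have hjt : j = (t : Int) := by omega
    have htlen : t ≤ lst.length := by omega
    by_cases hkt : k = t
    · subst hkt
      simp [hjt, List.length_take, Nat.min_eq_left htlen]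
    · by_cases hlt : k < t
      · have : ((k : Int) ≠ j) := by omega
        have : ((k : Int) < j) := by omega
        rw [if_neg (by omega), if_pos (by omega)]
        rw [PySem.List.pyGetD_natCast]
        rw [List.getElem_append_left (by simp [List.length_take]; omega)]
        simp [List.getElem_take, (by omega : k < lst.length)]
      · -- k > t
        rw [if_neg (by omega), if_neg (by omega)]
        have hk1' : (k : Int) - 1 = ((k - 1 : Nat) : Int) := by omega
        rw [hk1', PySem.List.pyGetD_natCast]
        rw [List.getElem_append_right (by simp [List.length_take]; omega)]
        rcases Nat.exists_eq_add_of_lt (by omega : t < k) with ⟨d, hd⟩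
        subst hd
        have hidx : t + d + 1 - (List.take j.toNat lst).length = d + 1 := by
          simp only [List.length_take]
          omega
        simp only [hidx, List.getElem_cons_succ, List.getElem_drop]
        have h2 : t + d + 1 - 1 = t + d := by omega
        rw [h2]
        have hb : j.toNat + d < lst.length := by omega
        exact List.getD_eq_getElem lst 0 hb

-- ===== VERDICT (by name: the statement is the Claim_ definition above) =====
theorem insertShiftArray2_spec : Claim_equal_insertShiftArray2 := by
  intro lst n _
  unfold Spec_insertShiftArray2 insertShiftArray2 insertShiftArray2_alt
  simp only []
  set len : Int := (lst.length : Int) with hlen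
  set j : Int :=
    if PySem.Int.mod len 2 = 0 then PySem.Int.floordiv len 2
    else if PySem.List.pyGetD lst (PySem.Int.floordiv len 2) 0 < n then
      PySem.Int.floordiv len 2 + 1
    else PySem.Int.floordiv len 2 with hj
  have hfd : PySem.Int.floordiv len 2 = len / 2 :=
    PySem.Int.floordiv_eq_ediv_of_pos (by omega)
  have hmod : PySem.Int.mod len 2 = len % 2 :=
    PySem.Int.mod_eq_emod_of_pos (by omega)
  have hbounds : 0 ≤ j ∧ j ≤ len := by
    rw [hj]
    split_ifs with h1 h2
    · rw [hfd]; constructor <;> omega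
    · rw [hmod] at h1; rw [hfd]
      have : len % 2 = 1 := by omega
      constructor <;> omega
    · rw [hfd]; constructor <;> omega
  rw [pv_fold_eq lst n j hbounds.1 hbounds.2,
      PySem.List.slice_to lst hbounds.1,
      PySem.List.slice_from lst hbounds.1]
  simp
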